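-- pv_equiv track=rewrite | github.com/AIAmplitudes/ChromoBoot_phase1 | generate_data.py | encode_mag
-- ===== SOURCE A (Python) =====
-- def encode_mag(number, base, mod=0):
--     if mod != 0:
--         number = number % mod
--     if base <= 1:
--         return [str(number)]
--     if number != 0:
--         prefix2 = []
--         w = abs(number)
--         while w > 0:
--             prefix2.append(str(w % base))
--             w = w // base
--         prefix2 = prefix2[::-1]
--     else:
--         prefix2 = ['0']
--     prefix2 = ['+'] + prefix2
--     return prefix2
-- ===== SOURCE B (Python) =====
-- def encode_mag(number, base, mod=0):
--     if mod != 0: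
--         number = number % mod
--     if base <= 1:
--         return [str(number)]
--     if number == 0:
--         return ['+', '0']
--     w = abs(number)
--     # find the largest power of base not exceeding w, then peel digits MSB-first
--     p = 1
--     while p * base <= w:
--         p *= base
--     out = ['+']
--     while p > 0:
--         out.append(str(w // p))
--         w = w % p
--         p = p // base
--     return out
-- ===== Notes on version B (the rewrite author's own statement) =====
-- stated objective: alternative
-- what changed: Instead of collecting digits least-significant-first and reversing, B first finds the largest power of the base not exceeding |number| and then peels digits most-significant-first by dividing by descending powers, so no reversal occurs.
import Mathlib
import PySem

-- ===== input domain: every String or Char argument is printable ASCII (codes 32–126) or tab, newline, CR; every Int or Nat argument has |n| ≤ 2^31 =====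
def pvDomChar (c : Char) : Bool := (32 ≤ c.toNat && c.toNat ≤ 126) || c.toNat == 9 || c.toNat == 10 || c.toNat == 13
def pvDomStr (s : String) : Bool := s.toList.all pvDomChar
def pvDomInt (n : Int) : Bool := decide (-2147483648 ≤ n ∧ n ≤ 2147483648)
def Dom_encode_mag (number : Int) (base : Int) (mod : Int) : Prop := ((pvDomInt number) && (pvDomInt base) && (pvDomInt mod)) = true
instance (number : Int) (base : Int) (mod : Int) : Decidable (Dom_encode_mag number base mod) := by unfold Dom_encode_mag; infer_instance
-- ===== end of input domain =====

-- B replaces A's LSB-first collect-then-reverse digit loop by first locating the largest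
-- power of the base ≤ |number| and peeling digits most-significant-first (no reversal);
-- return value proved equal on all inputs.

-- ===== PORT A =====
-- A's while loop: appends str(w % base) LSB-first, w = w // base.  The '1 < base'
-- conjunct in the guard only makes the recursion total; at the (only) call site
-- base > 1 holds, so the guard is exactly Python's 'w > 0'.
def encodeMagLoop (base : Int) (w : Int) (acc : List String) : List String :=
  if _h : 0 < w ∧ 1 < base then
    encodeMagLoop base (PySem.Int.floordiv w base) (acc ++ [PySem.Int.toStr (PySem.Int.mod w base)])
  else acc
termination_by w.toNat
decreasing_by
  rw [PySem.Int.floordiv_eq_ediv_of_pos (by omega)]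
  have h1 : w / base < w := by
    rw [Int.ediv_lt_iff_lt_mul (by omega)]
    nlinarith
  have _h2 : 0 ≤ w / base := Int.ediv_nonneg (by omega) (by omega)
  omega

def encode_mag (number : Int) (base : Int) (mod : Int) : List String :=
  let number := if mod ≠ 0 then PySem.Int.mod number mod else number
  if base ≤ 1 then [PySem.Int.toStr number]
  else
    -- prefix2[::-1] is exactly List.reverse
    let prefix2 := if number ≠ 0 then (encodeMagLoop base |number| []).reverse else ["0"]
    ["+"] ++ prefix2

-- ===== PORT B =====
-- Source B's first while loop: grow p by factors of base while p*base ≤ w.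
-- The '0 < p ∧ 1 < base' conjuncts only make the recursion total; they are loop
-- invariants at the (only) call site, where the guard is exactly 'p * base <= w'.
def encodeMagPow (w : Int) (base : Int) (p : Int) : Int :=
  if _h : p * base ≤ w ∧ 0 < p ∧ 1 < base then
    encodeMagPow w base (p * base)
  else p
termination_by (w - p).toNat
decreasing_by
  have : p < p * base := by nlinarith
  omega

-- Source B's second while loop: append str(w // p), then w %= p, p //= base.
def encodeMagPeel (w : Int) (p : Int) (base : Int) (out : List String) : List String :=
  if _h : 0 < p ∧ 1 < base then
    encodeMagPeel (PySem.Int.mod w p) (PySem.Int.floordiv p base) base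
      (out ++ [PySem.Int.toStr (PySem.Int.floordiv w p)])
  else out
termination_by p.toNat
decreasing_by
  rw [PySem.Int.floordiv_eq_ediv_of_pos (by omega)]
  have h1 : p / base < p := by
    rw [Int.ediv_lt_iff_lt_mul (by omega)]
    nlinarith
  have _h2 : 0 ≤ p / base := Int.ediv_nonneg (by omega) (by omega)
  omega

def encode_mag_alt (number : Int) (base : Int) (mod : Int) : List String :=
  let number := if mod ≠ 0 then PySem.Int.mod number mod else number
  if base ≤ 1 then [PySem.Int.toStr number]
  else if number = 0 then ["+", "0"]
  else
    let w := |number|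
    let p := encodeMagPow w base 1
    encodeMagPeel w p base ["+"]

-- ===== PRECONDITION & SPEC =====
def Spec_encode_mag (number : Int) (base : Int) (mod : Int) (out : List String) : Prop := out = encode_mag_alt number base mod
instance (number : Int) (base : Int) (mod : Int) (out : List String) : Decidable (Spec_encode_mag number base mod out) := by unfold Spec_encode_mag; infer_instance

-- ===== CLAIM (what is proved, stated in full; the proofs are below) =====
def Claim_equal_encode_mag : Prop := ∀ (number : Int) (base : Int) (mod : Int), Dom_encode_mag number base mod → Spec_encode_mag number base mod (encode_mag number base mod)

-- ===== LEMMAS AND PROOFS =====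

-- canonical MSB-first digit list (proof-side bridge between the two ports)
def digitsRec (w : Int) (base : Int) : List String :=
  if _h : 0 < w ∧ 1 < base then
    digitsRec (PySem.Int.floordiv w base) base ++ [PySem.Int.toStr (PySem.Int.mod w base)]
  else []
termination_by w.toNat
decreasing_by
  rw [PySem.Int.floordiv_eq_ediv_of_pos (by omega)]
  have h1 : w / base < w := by
    rw [Int.ediv_lt_iff_lt_mul (by omega)]
    nlinarith
  have _h2 : 0 ≤ w / base := Int.ediv_nonneg (by omega) (by omega)
  omega

theorem encodeMagLoop_reverse (base w : Int) (acc : List String) :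
    (encodeMagLoop base w acc).reverse = digitsRec w base ++ acc.reverse := by
  induction w, acc using encodeMagLoop.induct base with
  | case1 w acc h ih =>
      rw [encodeMagLoop, dif_pos h, digitsRec, dif_pos h, ih]
      simp
  | case2 w acc h =>
      rw [encodeMagLoop, dif_neg h, digitsRec, dif_neg h]
      simp

-- exactly k digits of w, MSB first (allows leading zeros)
def fixedDigits (k : Nat) (w : Int) (base : Int) : List String :=
  match k with
  | 0 => []
  | k + 1 => fixedDigits k (w / base) base ++ [PySem.Int.toStr (w % base)]

theorem encodeMagPow_spec (base : Int) (hb : 1 < base) :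
    ∀ (w p : Int), 0 < p → p ≤ w →
      ∃ k : Nat, encodeMagPow w base p = p * base ^ k ∧
        p * base ^ k ≤ w ∧ w < p * base ^ (k + 1) := by
  intro w p hp hpw
  induction p using encodeMagPow.induct w base with
  | case1 p h ih =>
      obtain ⟨k, hk, h1, h2⟩ := ih (by nlinarith) h.1
      refine ⟨k + 1, ?_, ?_, ?_⟩
      · rw [encodeMagPow, dif_pos h, hk]; ring
      · calc p * base ^ (k+1) = p * base * base ^ k := by ring
          _ ≤ w := h1
      · calc w < p * base * base ^ (k+1) := h2
          _ = p * base ^ (k+1+1) := by ring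
  | case2 p h =>
      have hble : ¬ p * base ≤ w := by
        intro hc; exact h ⟨hc, hp, hb⟩
      refine ⟨0, ?_, ?_, ?_⟩
      · rw [encodeMagPow, dif_neg h]; ring
      · simpa using hpw
      · simp only [zero_add, pow_one]; omega

theorem fixedDigits_msb (base : Int) (hb : 1 < base) :
    ∀ (k : Nat) (w : Int), 0 ≤ w → w < base ^ (k + 1) →
      fixedDigits (k + 1) w base =
        PySem.Int.toStr (w / base ^ k) :: fixedDigits k (w % base ^ k) base := by
  intro k
  induction k with
  | zero =>
      intro w hw0 hwlt
      simp only [zero_add, pow_one] at hwlt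
      simp [fixedDigits, Int.emod_eq_of_lt hw0 hwlt]
  | succ k ih =>
      intro w hw0 hwlt
      have hbpos : (0:Int) < base := by omega
      have hbk : (0:Int) < base ^ k := pow_pos hbpos k
      have hdiv0 : 0 ≤ w / base := Int.ediv_nonneg hw0 (by omega)
      have hdivlt : w / base < base ^ (k + 1) := by
        rw [Int.ediv_lt_iff_lt_mul hbpos]
        calc w < base ^ (k + 1 + 1) := hwlt
          _ = base ^ (k + 1) * base := by ring
      have key1 : (w % base ^ (k + 1)) / base = (w / base) % base ^ k := by
        have e1 : w % base ^ (k + 1) = w - base ^ (k + 1) * (w / base ^ (k + 1)) := by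
          rw [Int.emod_def]
        have e2 : w / base ^ (k + 1) = (w / base) / base ^ k := by
          rw [Int.ediv_ediv_eq_ediv_mul]
          · congr 1; ring
          · omega
        rw [e1, e2]
        have : (w - base ^ (k + 1) * ((w / base) / base ^ k)) =
            w + base * (-(base ^ k * ((w / base) / base ^ k))) := by ring
        rw [this, Int.add_mul_ediv_left _ _ (by omega : base ≠ 0)]
        rw [Int.emod_def]
        ring
      have key2 : (w % base ^ (k + 1)) % base = w % base := by
        have : (base : Int) ∣ base ^ (k + 1) := dvd_pow_self base (Nat.succ_ne_zero k)
        exact Int.emod_emod_of_dvd w this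
      have hmod0 : 0 ≤ w % base ^ (k + 1) := Int.emod_nonneg w (by positivity)
      have hmodlt : w % base ^ (k + 1) < base ^ (k + 1) :=
        Int.emod_lt_of_pos w (by positivity)
      calc fixedDigits (k + 2) w base
      = fixedDigits (k + 1) (w / base) base ++ [PySem.Int.toStr (w % base)] := rfl
      _ = (PySem.Int.toStr ((w / base) / base ^ k) ::
            fixedDigits k ((w / base) % base ^ k) base) ++ [PySem.Int.toStr (w % base)] := by
            rw [ih (w / base) hdiv0 hdivlt]
      _ = PySem.Int.toStr (w / base ^ (k + 1)) ::
            (fixedDigits k ((w % base ^ (k + 1)) / base) base ++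
             [PySem.Int.toStr ((w % base ^ (k + 1)) % base)]) := by
            rw [key1, key2]
            have e2 : w / base / base ^ k = w / base ^ (k + 1) := by
              rw [Int.ediv_ediv_eq_ediv_mul]
              · congr 1; ring
              · omega
            rw [e2]
            simp
      _ = PySem.Int.toStr (w / base ^ (k + 1)) ::
            fixedDigits (k + 1) (w % base ^ (k + 1)) base := rfl

theorem encodeMagPeel_spec (base : Int) (hb : 1 < base) :
    ∀ (k : Nat) (w : Int) (out : List String), 0 ≤ w → w < base ^ (k + 1) →
      encodeMagPeel w (base ^ k) base out = out ++ fixedDigits (k + 1) w base := by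
  intro k
  induction k with
  | zero =>
      intro w out hw0 hwlt
      simp only [zero_add, pow_zero, pow_one] at *
      rw [encodeMagPeel, dif_pos ⟨by omega, hb⟩]
      have h1 : PySem.Int.floordiv w 1 = w := by
        rw [PySem.Int.floordiv_eq_ediv_of_pos (by omega)]; simp
      have h2 : PySem.Int.mod w 1 = 0 := by
        rw [PySem.Int.mod_eq_emod_of_pos (by omega)]; simp
      have h3 : PySem.Int.floordiv 1 base = 0 := by
        rw [PySem.Int.floordiv_eq_ediv_of_pos (by omega)]
        exact Int.ediv_eq_zero_of_lt (by omega) hb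
      rw [h1, h2, h3, encodeMagPeel, dif_neg (by simp)]
      have : w % base = w := Int.emod_eq_of_lt hw0 hwlt
      simp [fixedDigits, this]
  | succ k ih =>
      intro w out hw0 hwlt
      have hbpos : (0:Int) < base := by omega
      have hpk : (0:Int) < base ^ (k + 1) := pow_pos hbpos _
      rw [encodeMagPeel, dif_pos ⟨hpk, hb⟩]
      have hfd : PySem.Int.floordiv (base ^ (k + 1)) base = base ^ k := by
        rw [PySem.Int.floordiv_eq_ediv_of_pos hbpos]
        have : (base : Int) ^ (k + 1) = base ^ k * base := by ring
        rw [this, Int.mul_ediv_cancel _ (by omega)]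
      have hmd : PySem.Int.mod w (base ^ (k + 1)) = w % base ^ (k + 1) :=
        PySem.Int.mod_eq_emod_of_pos hpk
      have hdd : PySem.Int.floordiv w (base ^ (k + 1)) = w / base ^ (k + 1) :=
        PySem.Int.floordiv_eq_ediv_of_pos hpk
      rw [hfd, hmd, hdd]
      have hm0 : 0 ≤ w % base ^ (k + 1) := Int.emod_nonneg w (by positivity)
      have hmlt : w % base ^ (k + 1) < base ^ (k + 1) := Int.emod_lt_of_pos w hpk
      rw [ih _ _ hm0 hmlt]
      rw [fixedDigits_msb base hb (k + 1) w hw0 hwlt]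
      simp

-- digitsRec equals fixedDigits when the digit count is exact (no leading zero)
theorem digitsRec_eq_fixedDigits (base : Int) (hb : 1 < base) :
    ∀ (k : Nat) (w : Int), base ^ k ≤ w → w < base ^ (k + 1) →
      digitsRec w base = fixedDigits (k + 1) w base := by
  intro k
  induction k with
  | zero =>
      intro w h1 h2
      simp only [zero_add, pow_zero, pow_one] at h1 h2
      rw [digitsRec, dif_pos ⟨by omega, hb⟩]
      have hfd : PySem.Int.floordiv w base = 0 := by
        rw [PySem.Int.floordiv_eq_ediv_of_pos (by omega)]
        exact Int.ediv_eq_zero_of_lt (by omega) h2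
      rw [hfd, digitsRec, dif_neg (by simp)]
      rw [PySem.Int.mod_eq_emod_of_pos (by omega)]
      have : w % base = w := Int.emod_eq_of_lt (by omega) h2
      simp [fixedDigits, this]
  | succ k ih =>
      intro w h1 h2
      have hbpos : (0:Int) < base := by omega
      have hk1 : (0:Int) < base ^ (k + 1) := pow_pos hbpos _
      have hwpos : 0 < w := lt_of_lt_of_le hk1 h1
      rw [digitsRec, dif_pos ⟨hwpos, hb⟩]
      rw [PySem.Int.floordiv_eq_ediv_of_pos hbpos, PySem.Int.mod_eq_emod_of_pos hbpos]
      have hlo : base ^ k ≤ w / base := by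
        rw [Int.le_ediv_iff_mul_le hbpos]
        calc base ^ k * base = base ^ (k + 1) := by ring
          _ ≤ w := h1
      have hhi : w / base < base ^ (k + 1) := by
        rw [Int.ediv_lt_iff_lt_mul hbpos]
        calc w < base ^ (k + 1 + 1) := h2
          _ = base ^ (k + 1) * base := by ring
      rw [ih _ hlo hhi]
      rfl

-- ===== VERDICT (by name: the statement is the Claim_ definition above) =====
theorem encode_mag_spec : Claim_equal_encode_mag := by
  intro number base mod _
  show encode_mag number base mod = encode_mag_alt number base mod
  unfold encode_mag encode_mag_alt
  simp only
  set n := if mod ≠ 0 then PySem.Int.mod number mod else number with hn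
  by_cases hb : base ≤ 1
  · simp [hb]
  · push_neg at hb
    by_cases hz : n = 0
    · simp [hz, not_le.mpr hb]
    · have hw : 0 < |n| := abs_pos.mpr hz
      simp only [if_neg (not_le.mpr hb), if_pos hz, if_neg (by simpa using hz)]
      obtain ⟨k, hkval, hk1, hk2⟩ := encodeMagPow_spec base hb |n| 1 one_pos (by omega)
      simp only [one_mul] at hkval hk1 hk2
      rw [hkval]
      rw [encodeMagPeel_spec base hb k |n| ["+"] (by omega) hk2]
      rw [encodeMagLoop_reverse, digitsRec_eq_fixedDigits base hb k |n| hk1 hk2]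
      simp
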